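-- pv_equiv track=rewrite | github.com/michaelstrefeler/100daysofcode-with-python-course | days/13-15-text-games/rock_paper_scissors/data_reader.py | read_roll
-- ===== SOURCE A (Python) =====
-- def read_roll(row: dict):
--     name = row['Attacker']
--     del row['Attacker']
--     del row[name]
--
--     outcomes = []
--     for k in row.keys():
--         can_defeat = row[k].strip().lower() == 'win'
--         outcomes.append("{} {}".format(k, can_defeat))
--
--     wins = []
--     loses = []
--     for outcome in outcomes:
--         if outcome.endswith('False'):
--             loses.append(outcome[:-6])
--         elif outcome.endswith('True'):
--             wins.append(outcome[:-5])
--     if name in wins: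
--         del wins[wins.index(name)]
--
--     if name in loses:
--         del loses[loses.index(name)]
--
--     return name, wins, loses
-- ===== SOURCE B (Python) =====
-- # B: single direct-classification pass over the remaining items -- no intermediate
-- # "key True/False" string list, no suffix parsing, no dead name-removal blocks.
-- # Like A it mutates the argument dict in place (removes 'Attacker' and the attacker's own key).
-- def read_roll(row: dict):
--     name = row.pop('Attacker')
--     del row[name]
--     wins = []
--     loses = []
--     for k, v in row.items():
--         if v.strip().lower() == 'win':
--             wins.append(k)
--         else:
--             loses.append(k)
--     return name, wins, loses
-- ===== Notes on version B (the rewrite author's own statement) =====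
-- stated objective: simpler
-- what changed: B classifies each remaining key directly from its stripped/lowered value in one loop, instead of A's encode-to-'key True/False'-strings pass followed by an endswith/slice parsing pass and two dead name-removal blocks.
import Mathlib
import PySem

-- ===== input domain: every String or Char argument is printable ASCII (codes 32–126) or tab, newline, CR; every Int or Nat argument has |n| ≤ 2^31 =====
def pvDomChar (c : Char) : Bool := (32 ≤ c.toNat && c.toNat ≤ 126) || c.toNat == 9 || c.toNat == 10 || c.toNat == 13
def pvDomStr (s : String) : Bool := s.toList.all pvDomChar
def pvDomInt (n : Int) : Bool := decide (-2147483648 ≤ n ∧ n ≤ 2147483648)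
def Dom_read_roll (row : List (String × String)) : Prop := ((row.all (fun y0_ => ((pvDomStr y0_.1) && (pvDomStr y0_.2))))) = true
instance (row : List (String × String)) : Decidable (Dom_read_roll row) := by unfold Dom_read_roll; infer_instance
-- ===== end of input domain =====

-- B replaces A's encode-to-"key True/False"-strings pass + endswith/slice decoding pass (and its
-- dead name-removal blocks) by one direct classification loop over the remaining items; objective:
-- simpler. Like A, the Python B mutates the argument dict in place (same two deletions); the
-- equivalence proved here is about the return value.

-- shared one-liner: row[k].strip().lower() == 'win' (appears verbatim in both Pythons)
def pvIsWin (v : String) : Bool := PySem.Str.lower (PySem.Str.strip v) == "win"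

-- ===== PORT A =====
def read_roll (row : List (String × String)) : String × List String × List String :=
  let d0 := PySem.Dict.ofList row
  match d0.get? "Attacker" with
  | none => ("", [], [])   -- Python raises KeyError; excluded by Pre_
  | some name =>
    let d1 := d0.erase "Attacker"
    if d1.contains name then
      let d := d1.erase name
      -- outcomes.append("{} {}".format(k, can_defeat)): str(bool) is "True"/"False" (hand port, exact)
      let outcomes := d.keys.foldl (fun acc k =>
        acc ++ [k ++ " " ++ (if pvIsWin (d.getD k "") then "True" else "False")]) ([] : List String)
      let wl := outcomes.foldl (fun (p : List String × List String) o =>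
        if PySem.Str.endswith o "False" then (p.1, p.2 ++ [PySem.Str.slice o none (some (-6))])
        else if PySem.Str.endswith o "True" then (p.1 ++ [PySem.Str.slice o none (some (-5))], p.2)
        else p) (([], []) : List String × List String)
      -- if name in wins: del wins[wins.index(name)]  (del at .index = remove first occurrence)
      let wins := if wl.1.contains name then (PySem.List.remove? wl.1 name).getD wl.1 else wl.1
      let loses := if wl.2.contains name then (PySem.List.remove? wl.2 name).getD wl.2 else wl.2
      (name, wins, loses)
    else ("", [], [])      -- Python raises KeyError on del row[name]; excluded by Pre_

-- ===== PORT B =====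
def read_roll_alt (row : List (String × String)) : String × List String × List String :=
  let d0 := PySem.Dict.ofList row
  match d0.get? "Attacker" with
  | none => ("", [], [])   -- row.pop('Attacker') raises KeyError; excluded by Pre_
  | some name =>
    let d1 := d0.erase "Attacker"
    if d1.contains name then
      let wl := (d1.erase name).items.foldl (fun (p : List String × List String) kv =>
        if pvIsWin kv.2 then (p.1 ++ [kv.1], p.2) else (p.1, p.2 ++ [kv.1]))
        (([], []) : List String × List String)
      (name, wl.1, wl.2)
    else ("", [], [])      -- del row[name] raises KeyError; excluded by Pre_

-- ===== PRECONDITION & SPEC =====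
-- Pre_ excludes exactly the inputs where the Python raises KeyError: no 'Attacker' key, or the
-- attacker's own name absent from the dict after 'Attacker' is deleted (incl. name = 'Attacker').
def Pre_read_roll (row : List (String × String)) : Prop :=
  ((PySem.Dict.ofList row).contains "Attacker" = true) ∧
  (((PySem.Dict.ofList row).erase "Attacker").contains
      (((PySem.Dict.ofList row).get? "Attacker").getD "") = true)
instance (row : List (String × String)) : Decidable (Pre_read_roll row) := by
  unfold Pre_read_roll; infer_instance
def pvWitness_read_roll : (List (String × String)) :=
  [("Attacker", "rock"), ("rock", "lose"), ("paper", " Win "), ("scissors", "lose")]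
def Spec_read_roll (row : List (String × String)) (out : String × List String × List String) : Prop := out = read_roll_alt row
instance (row : List (String × String)) (out : String × List String × List String) : Decidable (Spec_read_roll row out) := by unfold Spec_read_roll; infer_instance

-- ===== CLAIM (what is proved, stated in full; the proofs are below) =====
def Claim_equal_read_roll : Prop := ∀ (row : List (String × String)), Dom_read_roll row → Pre_read_roll row → Spec_read_roll row (read_roll row)

-- ===== LEMMAS AND PROOFS =====

-- A's formatted string "k False" never passes endswith('True') test order wrongly: string facts
theorem pv_endswith_true_true (k : String) :
    PySem.Str.endswith (k ++ " " ++ "True") "True" = true := by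
  rw [PySem.Str.endswith_eq, PySem.Chars.endswith_iff,
      String.toList_append, String.toList_append, List.append_assoc]
  exact (List.suffix_append (" ".toList) ("True".toList)).trans (List.suffix_append _ _)

theorem pv_endswith_true_false (k : String) :
    PySem.Str.endswith (k ++ " " ++ "True") "False" = false := by
  rw [Bool.eq_false_iff]
  intro h
  rw [PySem.Str.endswith_eq, PySem.Chars.endswith_iff,
      String.toList_append, String.toList_append, List.append_assoc] at h
  have h2 : "False".toList <:+ (" ".toList ++ "True".toList) :=
    List.suffix_of_suffix_length_le h (List.suffix_append _ _) (by decide)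
  exact absurd h2 (by decide)

theorem pv_endswith_false_false (k : String) :
    PySem.Str.endswith (k ++ " " ++ "False") "False" = true := by
  rw [PySem.Str.endswith_eq, PySem.Chars.endswith_iff,
      String.toList_append, String.toList_append, List.append_assoc]
  exact (List.suffix_append (" ".toList) ("False".toList)).trans (List.suffix_append _ _)

theorem pv_slice_true (k : String) :
    PySem.Str.slice (k ++ " " ++ "True") none (some (-5)) = k := by
  rw [← String.toList_inj, PySem.Str.toList_slice, PySem.Chars.slice_eq_listSlice,
      PySem.List.slice_to_neg_ofNat _ 5 (by omega),
      String.toList_append, String.toList_append, List.append_assoc]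
  simp

theorem pv_slice_false (k : String) :
    PySem.Str.slice (k ++ " " ++ "False") none (some (-6)) = k := by
  rw [← String.toList_inj, PySem.Str.toList_slice, PySem.Chars.slice_eq_listSlice,
      PySem.List.slice_to_neg_ofNat _ 6 (by omega),
      String.toList_append, String.toList_append, List.append_assoc]
  simp

-- A's decode fold over the formatted strings IS B's direct classification fold
theorem pv_classify_eq (ps : List (String × String)) (w l : List String) :
    (ps.map (fun kv => kv.1 ++ " " ++ (if pvIsWin kv.2 then "True" else "False"))).foldl
      (fun (p : List String × List String) o =>
        if PySem.Str.endswith o "False" then (p.1, p.2 ++ [PySem.Str.slice o none (some (-6))])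
        else if PySem.Str.endswith o "True" then (p.1 ++ [PySem.Str.slice o none (some (-5))], p.2)
        else p) (w, l)
    = ps.foldl (fun (p : List String × List String) kv =>
        if pvIsWin kv.2 then (p.1 ++ [kv.1], p.2) else (p.1, p.2 ++ [kv.1])) (w, l) := by
  induction ps generalizing w l with
  | nil => rfl
  | cons kv t ih =>
    cases hw : pvIsWin kv.2 with
    | true =>
      simp only [List.map_cons, List.foldl_cons, hw, pv_endswith_true_false,
        pv_endswith_true_true, pv_slice_true, Bool.false_eq_true, if_false, if_true]
      exact ih _ _
    | false =>
      simp only [List.map_cons, List.foldl_cons, hw, pv_endswith_false_false,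
        pv_slice_false, Bool.false_eq_true, if_false, if_true]
      exact ih _ _

-- B's fold in closed form: appended keys of the win-filter / lose-filter of the items
theorem pv_fold_filter (ps : List (String × String)) (w l : List String) :
    ps.foldl (fun (p : List String × List String) kv =>
        if pvIsWin kv.2 then (p.1 ++ [kv.1], p.2) else (p.1, p.2 ++ [kv.1])) (w, l)
    = (w ++ (ps.filter (fun kv => pvIsWin kv.2)).map (·.1),
       l ++ (ps.filter (fun kv => !pvIsWin kv.2)).map (·.1)) := by
  induction ps generalizing w l with
  | nil => simp
  | cons kv t ih =>
    by_cases hw : pvIsWin kv.2 <;> simp [hw, ih]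

theorem read_roll_spec_aux (row : List (String × String)) (h : Pre_read_roll row) :
    read_roll row = read_roll_alt row := by
  obtain ⟨h1, h2⟩ := h
  rw [PySem.Dict.contains_eq_isSome_get?] at h1
  cases hget : (PySem.Dict.ofList row).get? "Attacker" with
  | none => rw [hget] at h1; simp at h1
  | some name =>
    rw [hget] at h2
    simp only [Option.getD_some] at h2
    unfold read_roll read_roll_alt
    simp only [hget]
    rw [if_pos h2, if_pos h2]
    -- name all the dicts
    set d1 := (PySem.Dict.ofList row).erase "Attacker" with hd1
    set d := d1.erase name with hd
    have hnodup : d.keys.Nodup := by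
      have h0 : (PySem.Dict.ofList row).keys.Nodup := PySem.Dict.nodup_keys_ofList row
      have : ∀ (e : PySem.Dict String String) (k : String),
          e.keys.Nodup → (e.erase k).keys.Nodup := by
        intro e k he
        simp only [PySem.Dict.erase, PySem.Dict.keys] at *
        exact (List.Sublist.map _ List.filter_sublist).nodup he
      exact this _ _ (this _ _ h0)
    -- A's first loop = map over keys, then over items
    rw [PySem.List.foldl_append_singleton_eq_map
      (fun k => k ++ " " ++ (if pvIsWin (d.getD k "") then "True" else "False")) d.keys []]
    rw [List.nil_append]
    have hitems : d.items = d.keys.map (fun k => (k, d.getD k "")) :=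
      PySem.Dict.items_eq_map_keys d hnodup ""
    have hmap : d.keys.map (fun k => k ++ " " ++ (if pvIsWin (d.getD k "") then "True" else "False"))
        = d.items.map (fun kv => kv.1 ++ " " ++ (if pvIsWin kv.2 then "True" else "False")) := by
      rw [hitems, List.map_map]
      rfl
    rw [hmap, pv_classify_eq, pv_fold_filter]
    -- name is not among d's keys, so A's two trailing guards are dead
    have hnomem : ∀ kv : String × String, kv ∈ d.items → kv.1 ≠ name := by
      intro kv hkv
      rw [hd] at hkv
      simp only [PySem.Dict.erase] at hkv
      have := List.of_mem_filter hkv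
      simpa using this
    have hw : ((List.filter (fun kv => pvIsWin kv.2) d.items).map (·.1)).contains name = false := by
      rw [Bool.eq_false_iff]
      intro hc
      have := List.mem_of_elem_eq_true hc
      simp only [List.mem_map] at this
      obtain ⟨kv, hkv, hkv1⟩ := this
      exact hnomem kv (List.mem_of_mem_filter hkv) hkv1
    have hl : ((List.filter (fun kv => !pvIsWin kv.2) d.items).map (·.1)).contains name = false := by
      rw [Bool.eq_false_iff]
      intro hc
      have := List.mem_of_elem_eq_true hc
      simp only [List.mem_map] at this
      obtain ⟨kv, hkv, hkv1⟩ := this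
      exact hnomem kv (List.mem_of_mem_filter hkv) hkv1
    simp only [List.nil_append, hw, hl, Bool.false_eq_true, if_false]

-- ===== VERDICT (by name: the statement is the Claim_ definition above) =====
theorem read_roll_spec : Claim_equal_read_roll := by
  intro row _ hpre
  unfold Spec_read_roll
  exact read_roll_spec_aux row hpre
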